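-- pv_equiv track=rewrite | github.com/francis-de-ladu/advent_of_code | 2015/16/solution.py | part2
-- ===== SOURCE A (Python) =====
-- from operator import eq, gt, lt
--
-- def read_ticker_tape():
--     return dict(
--         children=3,
--         cats=7,
--         samoyeds=2,
--         pomeranians=3,
--         akitas=0,
--         vizslas=0,
--         goldfish=5,
--         trees=3,
--         cars=2,
--         perfumes=1,
--     )
--
-- def part2(data):
--     ticker_tape = read_ticker_tape()
--     ops = dict(cats=gt, trees=gt, pomeranians=lt, goldfish=lt)
--     for i, aunt in enumerate(data):
--         for compound, quantity in ticker_tape.items():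
--             op = ops.get(compound, eq)
--             if compound in aunt and not op(aunt[compound], quantity):
--                 break
--         else:
--             return i + 1
-- ===== SOURCE B (Python) =====
-- from operator import eq, gt, lt
--
-- def part2(data):
--     ticker_tape = dict(
--         children=3, cats=7, samoyeds=2, pomeranians=3, akitas=0,
--         vizslas=0, goldfish=5, trees=3, cars=2, perfumes=1,
--     )
--     ops = dict(cats=gt, trees=gt, pomeranians=lt, goldfish=lt)
--     candidates = list(range(len(data)))
--     for compound, quantity in ticker_tape.items():
--         op = ops.get(compound, eq)
--         candidates = [i for i in candidates
--                       if compound not in data[i] or op(data[i][compound], quantity)]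
--     return min(candidates) + 1 if candidates else None
-- ===== Notes on version B (the rewrite author's own statement) =====
-- stated objective: alternative
-- what changed: Replaced the per-aunt inner loop with an early break by an outer loop over the ticker-tape compounds that successively filters a shrinking candidate index set, returning min(candidates)+1 or None.
import Mathlib
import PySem

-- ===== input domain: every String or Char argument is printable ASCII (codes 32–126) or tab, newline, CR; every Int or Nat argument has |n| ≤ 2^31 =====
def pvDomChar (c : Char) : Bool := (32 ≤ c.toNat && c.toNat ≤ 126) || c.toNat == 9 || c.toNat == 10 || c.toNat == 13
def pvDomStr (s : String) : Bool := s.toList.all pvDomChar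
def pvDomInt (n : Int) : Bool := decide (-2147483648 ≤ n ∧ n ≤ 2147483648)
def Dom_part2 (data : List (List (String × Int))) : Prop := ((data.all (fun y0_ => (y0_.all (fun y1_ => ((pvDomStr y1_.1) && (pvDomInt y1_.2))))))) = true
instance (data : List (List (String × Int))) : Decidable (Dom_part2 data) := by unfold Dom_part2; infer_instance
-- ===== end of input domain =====

-- B keeps a shrinking set of candidate aunt indices, filtered once per ticker-tape compound,
-- instead of A's per-aunt inner loop with break/else; same cost, different decomposition ("alternative").

-- ===== PORT A =====
-- the ticker tape and the comparison selected by ops.get(compound, eq) (shared literal data of both Pythons)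
def pvTape : List (String × Int) :=
  [("children", 3), ("cats", 7), ("samoyeds", 2), ("pomeranians", 3), ("akitas", 0),
   ("vizslas", 0), ("goldfish", 5), ("trees", 3), ("cars", 2), ("perfumes", 1)]

def pvOp (compound : String) (v q : Int) : Bool :=
  if compound = "cats" ∨ compound = "trees" then v > q
  else if compound = "pomeranians" ∨ compound = "goldfish" then v < q
  else v = q

-- inner 'for compound, quantity in ticker_tape.items(): … break / else: return i+1' (true = no break)
def part2Check (aunt : PySem.Dict String Int) : List (String × Int) → Bool
  | [] => true
  | (c, q) :: rest =>
    if aunt.contains c && !(pvOp c (aunt.getD c 0) q) then false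
    else part2Check aunt rest

def part2Go : List (List (String × Int)) → Int → Option Int
  | [], _ => none
  | aunt :: rest, i =>
    if part2Check (PySem.Dict.ofList aunt) pvTape then some (i + 1)
    else part2Go rest (i + 1)

def part2 (data : List (List (String × Int))) : Option Int :=
  part2Go data 0

-- ===== PORT B =====
-- 'compound not in data[i] or op(data[i][compound], quantity)'
def part2Keep (aunt : PySem.Dict String Int) (c : String) (q : Int) : Bool :=
  !aunt.contains c || pvOp c (aunt.getD c 0) q

def part2_alt (data : List (List (String × Int))) : Option Int :=
  let cands := pvTape.foldl
    (fun cs p =>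
      cs.filter (fun i => part2Keep (PySem.Dict.ofList (PySem.List.pyGetD data i [])) p.1 p.2))
    (PySem.List.pyRange 0 (data.length : Int) 1)
  (PySem.List.min? cands (fun x => x)).map (· + 1)

-- ===== PRECONDITION & SPEC =====
def Spec_part2 (data : List (List (String × Int))) (out : Option Int) : Prop := out = part2_alt data
instance (data : List (List (String × Int))) (out : Option Int) : Decidable (Spec_part2 data out) := by unfold Spec_part2; infer_instance

-- ===== CLAIM (what is proved, stated in full; the proofs are below) =====
def Claim_equal_part2 : Prop := ∀ (data : List (List (String × Int))), Dom_part2 data → Spec_part2 data (part2 data)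

-- ===== LEMMAS AND PROOFS =====

-- folding one filter per compound = one filter by the conjunction of all compounds
lemma foldl_filter_all (f : String × Int → Int → Bool) :
    ∀ (l : List (String × Int)) (cs : List Int),
      l.foldl (fun cs p => cs.filter (f p)) cs = cs.filter (fun i => l.all (fun p => f p i)) := by
  intro l
  induction l with
  | nil => intro cs; simp
  | cons p rest ih =>
    intro cs
    simp only [List.foldl_cons, ih, List.filter_filter, List.all_cons]
    exact List.filter_congr (fun i _ => by rw [Bool.and_comm])

-- A's inner loop succeeds iff every compound passes B's keep test
lemma check_eq_all (aunt : PySem.Dict String Int) (l : List (String × Int)) :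
    part2Check aunt l = l.all (fun p => part2Keep aunt p.1 p.2) := by
  induction l with
  | nil => rfl
  | cons p rest ih =>
    obtain ⟨c, q⟩ := p
    simp only [part2Check, part2Keep, ih, List.all_cons]
    by_cases h1 : aunt.contains c = true <;> by_cases h2 : pvOp c (aunt.getD c 0) q = true <;>
      simp [h1, h2]

lemma foldl_min_of_le (a : Int) : ∀ (xs : List Int), (∀ x ∈ xs, a ≤ x) → xs.foldl min a = a := by
  intro xs
  induction xs generalizing a with
  | nil => intro _; rfl
  | cons x t ih =>
    intro h
    have hx : a ≤ x := h x (by simp)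
    simp only [List.foldl_cons, min_eq_left hx]
    exact ih a (fun y hy => h y (by simp [hy]))

-- the per-index predicate B filters with
def pvM (data : List (List (String × Int))) (i : Int) : Bool :=
  part2Check (PySem.Dict.ofList (PySem.List.pyGetD data i [])) pvTape

lemma go_eq (data : List (List (String × Int))) :
    ∀ (k j : Nat), data.length - j = k → j ≤ data.length →
      part2Go (data.drop j) (j : Int)
        = (PySem.List.min?
            ((PySem.List.pyRange (j : Int) (data.length : Int) 1).filter (pvM data))
            (fun x => x)).map (· + 1) := by
  intro k
  induction k with
  | zero =>
    intro j hk hj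
    have hj' : j = data.length := by omega
    subst hj'
    rw [List.drop_length, PySem.List.pyRange_one_eq_nil (by omega)]
    rfl
  | succ k ih =>
    intro j hk hj
    have hlt : j < data.length := by omega
    have hdrop : data.drop j = data[j] :: data.drop (j + 1) :=
      List.drop_eq_getElem_cons hlt
    have hrange : PySem.List.pyRange (j : Int) (data.length : Int) 1
        = (j : Int) :: PySem.List.pyRange ((j : Int) + 1) (data.length : Int) 1 :=
      PySem.List.pyRange_one_cons (by exact_mod_cast hlt)
    have hget : PySem.List.pyGetD data (j : Int) [] = data[j] := by
      rw [PySem.List.pyGetD_natCast]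
      exact List.getD_eq_getElem _ _ hlt
    have hih := ih (j + 1) (by omega) (by omega)
    push_cast at hih
    rw [hdrop, hrange]
    simp only [part2Go, List.filter_cons]
    have hMj : pvM data (j : Int) = part2Check (PySem.Dict.ofList data[j]) pvTape := by
      simp [pvM, hget]
    by_cases hc : part2Check (PySem.Dict.ofList data[j]) pvTape = true
    · rw [if_pos hc, hMj, hc]
      simp only [if_true]
      rw [PySem.List.min?_id_cons]
      have : (((PySem.List.pyRange ((j : Int) + 1) (data.length : Int) 1).filter
          (pvM data)).foldl min (j : Int)) = (j : Int) := by
        apply foldl_min_of_le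
        intro x hx
        have hx' := List.of_mem_filter (p := pvM data) hx
        have hmem := List.mem_of_mem_filter hx
        have := (PySem.List.mem_pyRange_one.mp hmem).1
        omega
      rw [this]
      rfl
    · rw [if_neg hc, hMj, Bool.eq_false_iff.mpr hc]
      simp only [Bool.false_eq_true, if_false]
      exact hih

lemma part2_eq (data : List (List (String × Int))) : part2 data = part2_alt data := by
  have h0 := go_eq data data.length 0 (by omega) (by omega)
  simp only [List.drop_zero, Nat.cast_zero] at h0
  unfold part2 part2_alt
  rw [h0, foldl_filter_all]
  have hf : List.filter (pvM data) (PySem.List.pyRange 0 (data.length : Int) 1)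
      = List.filter
          (fun i => pvTape.all fun p => part2Keep (PySem.Dict.ofList (PySem.List.pyGetD data i [])) p.1 p.2)
          (PySem.List.pyRange 0 (data.length : Int) 1) :=
    List.filter_congr (fun i _ => by simp [pvM, check_eq_all])
  rw [hf]

-- ===== VERDICT (by name: the statement is the Claim_ definition above) =====
theorem part2_spec : Claim_equal_part2 := by
  intro data _
  exact part2_eq data
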